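-- pv_equiv track=rewrite | github.com/Zeitungsleser/BriocheGenerator | main.py | check
-- ===== SOURCE A (Python) =====
-- def check(line):
--     for idx,i in enumerate(line):
--         if i=='l' or i=='r':
--             if idx == 0:
--                 return False
--             if line[idx-1] != '|':
--                 return False
--         if i=='s':
--             if idx == len(line)-1 or idx==0:
--                 return False
--             if line[idx-1] != '|' or line[idx+1] != '|':
--                 return False
--     return True
-- ===== SOURCE B (Python) =====
-- def check(line):
--     def bad(t):
--         return any(c in 'lrs' for c in t)
--     first, *rest = line.split('|')
--     if bad(first):
--         return False
--     if rest:
--         *inner, last = rest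
--         if bad(last[1:]) or last[:1] == 's':
--             return False
--         for seg in inner:
--             if bad(seg[1:]) or (seg[:1] == 's' and seg != 's'):
--                 return False
--     return True
-- ===== Notes on version B (the rewrite author's own statement) =====
-- stated objective: alternative
-- what changed: Replaces A's indexed character scan with idx-1/idx+1 neighbour lookups by splitting the line on '|' and judging segments: the head segment must contain no 'l'/'r'/'s', every later segment may start with 'l'/'r', may be exactly 's' unless it is the last segment, and must be otherwise free of 'l'/'r'/'s'.
import Mathlib
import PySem

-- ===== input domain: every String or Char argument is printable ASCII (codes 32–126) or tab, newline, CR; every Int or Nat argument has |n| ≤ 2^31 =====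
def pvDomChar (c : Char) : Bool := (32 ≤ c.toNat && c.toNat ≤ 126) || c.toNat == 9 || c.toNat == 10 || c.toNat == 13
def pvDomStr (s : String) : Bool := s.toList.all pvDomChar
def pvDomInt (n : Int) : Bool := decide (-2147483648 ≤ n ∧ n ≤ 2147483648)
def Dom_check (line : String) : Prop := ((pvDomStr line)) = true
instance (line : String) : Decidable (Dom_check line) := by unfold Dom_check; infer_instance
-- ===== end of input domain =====

-- B replaces A's indexed scan with neighbour lookups by splitting the line on '|' and judging
-- each segment on its own (objective: alternative; same linear cost as A).

-- ===== PORT A =====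
-- A's for-loop over enumerate(line) with early returns; line[idx-1] / line[idx+1] via pyGet?.
def checkGo (cs : List Char) : List (Int × Char) → Bool
  | [] => true
  | (idx, i) :: rest =>
    if (i == 'l' || i == 'r') && (idx == 0 || !(PySem.List.pyGet? cs (idx - 1) == some '|')) then
      false
    else if (i == 's') &&
        (idx == (cs.length : Int) - 1 || idx == 0 ||
         !(PySem.List.pyGet? cs (idx - 1) == some '|') ||
         !(PySem.List.pyGet? cs (idx + 1) == some '|')) then
      false
    else checkGo cs rest

def check (line : String) : Bool :=
  checkGo line.toList (PySem.List.enumerate line.toList 0)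

-- ===== PORT B =====
-- Source B's bad(t) = any(c in 'lrs' for c in t)
def badSeg (t : List Char) : Bool := t.any (fun c => c == 'l' || c == 'r' || c == 's')

-- Source B's for-loop over the inner segments (everything between the first and the last '|')
def innerOk : List (List Char) → Bool
  | [] => true
  | seg :: more =>
    if badSeg (seg.drop 1) || (seg.take 1 == ['s'] && !(seg == ['s'])) then false
    else innerOk more

-- first, *rest = line.split('|'); check first, then the last segment, then the inner loop.
-- line.split('|') is ported as List.splitOn '|' on the code points (exact for a 1-char separator).
def check_alt (line : String) : Bool :=
  match (line.toList).splitOn '|' with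
  | [] => true
  | first :: rest =>
    if badSeg first then false
    else if rest.isEmpty then true
    else
      let inner := rest.dropLast
      let last := rest.getLastD []
      if badSeg (last.drop 1) || last.take 1 == ['s'] then false
      else innerOk inner

-- ===== PRECONDITION & SPEC =====
def Spec_check (line : String) (out : Bool) : Prop := out = check_alt line
instance (line : String) (out : Bool) : Decidable (Spec_check line out) := by unfold Spec_check; infer_instance

-- ===== CLAIM (what is proved, stated in full; the proofs are below) =====
def Claim_equal_check : Prop := ∀ (line : String), Dom_check line → Spec_check line (check line)

-- ===== LEMMAS AND PROOFS =====

-- Common middle form: a one-pass recursion carrying the previous character.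
def good (p : Char) : List Char → Bool
  | [] => true
  | c :: cs =>
    (!(c == 'l' || c == 'r' || c == 's') || p == '|') &&
    (!(c == 's') || cs.headD ' ' == '|') &&
    good c cs
def lastOk : List Char → Bool
  | [] => true
  | c :: t => !(c == 's') && !badSeg t
def segInner : List Char → Bool
  | [] => true
  | [_] => true
  | c :: t => !(c == 's') && !badSeg t

lemma lastOk_eq (t : List Char) :
    lastOk t = !(badSeg (t.drop 1) || t.take 1 == ['s']) := by
  cases t with
  | nil => decide
  | cons c t =>
    simp only [lastOk, List.drop_one, List.tail_cons, List.take_one, List.head?_cons,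
      Option.toList_some]
    cases hs : (c == 's') <;> cases hb : badSeg t <;> simp [hs, hb, beq_iff_eq] <;>
      simp [beq_iff_eq] at hs <;> simp [hs]

lemma segInner_eq (t : List Char) :
    segInner t = !(badSeg (t.drop 1) || (t.take 1 == ['s'] && !(t == ['s']))) := by
  match t with
  | [] => decide
  | [c] =>
    simp only [segInner, List.drop_one, List.tail_cons, List.take_one, List.head?_cons,
      Option.toList_some]
    cases hs : (c == 's') <;> simp [hs, badSeg, beq_iff_eq] <;> simp [beq_iff_eq] at hs <;>
      simp [hs]
  | c :: d :: t =>
    simp only [segInner, List.drop_one, List.tail_cons, List.take_one, List.head?_cons,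
      Option.toList_some]
    have hne : ((c :: d :: t : List Char) == ['s']) = false := by
      simp [beq_iff_eq]
    rw [hne]
    cases hs : (c == 's') <;> cases hb : badSeg (d :: t) <;> simp [hs, hb, beq_iff_eq] <;>
      simp [beq_iff_eq] at hs <;> simp [hs]
lemma good_cons (p c : Char) (cs : List Char) :
    good p (c :: cs) =
      ((!(c == 'l' || c == 'r' || c == 's') || p == '|') &&
       (!(c == 's') || cs.headD ' ' == '|') && good c cs) := rfl

lemma good_no_pipe (cs : List Char) (p : Char) (hcs : '|' ∉ cs) (hp : ¬ p = '|') :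
    good p cs = !badSeg cs := by
  induction cs generalizing p with
  | nil => simp [good, badSeg]
  | cons c cs ih =>
    have hc : c ≠ '|' := fun h => hcs (h ▸ List.mem_cons_self)
    have hcs' : '|' ∉ cs := fun h => hcs (List.mem_cons_of_mem _ h)
    by_cases hlrs : (c == 'l' || c == 'r' || c == 's') = true
    · simp [good, badSeg, hlrs, beq_iff_eq, hp]
    · have h' : (c == 'l' || c == 'r' || c == 's') = false := Bool.of_not_eq_true hlrs
      simp only [Bool.or_eq_false_iff] at h'
      obtain ⟨⟨hl, hr⟩, hs⟩ := h'
      simp [good, badSeg, hl, hr, hs, ih c hcs' hc]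

lemma good_seg_pipe (seg rest : List Char) (p : Char) (hseg : '|' ∉ seg) (hp : ¬ p = '|') :
    good p (seg ++ '|' :: rest) = (!badSeg seg && good '|' rest) := by
  induction seg generalizing p with
  | nil => simp [good, badSeg]
  | cons c seg ih =>
    have hc : c ≠ '|' := fun h => hseg (h ▸ List.mem_cons_self)
    have hseg' : '|' ∉ seg := fun h => hseg (List.mem_cons_of_mem _ h)
    by_cases hlrs : (c == 'l' || c == 'r' || c == 's') = true
    · simp [good, badSeg, hlrs, beq_iff_eq, hp]
    · have h' : (c == 'l' || c == 'r' || c == 's') = false := Bool.of_not_eq_true hlrs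
      simp only [Bool.or_eq_false_iff] at h'
      obtain ⟨⟨hl, hr⟩, hs⟩ := h'
      simp [good, badSeg, hl, hr, hs, ih c hseg' hc]

lemma headD_ne_pipe (cs : List Char) (h : '|' ∉ cs) : (cs.headD ' ' == '|') = false := by
  cases cs with
  | nil => decide
  | cons c cs =>
    have : c ≠ '|' := fun hc => h (hc ▸ List.mem_cons_self)
    simp [beq_iff_eq, this]

lemma good_pipe_no_pipe (cs : List Char) (hcs : '|' ∉ cs) : good '|' cs = lastOk cs := by
  cases cs with
  | nil => decide
  | cons c cs =>
    have hc : c ≠ '|' := fun h => hcs (h ▸ List.mem_cons_self)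
    have hcs' : '|' ∉ cs := fun h => hcs (List.mem_cons_of_mem _ h)
    have h1 := good_no_pipe cs c hcs' hc
    have h2 := headD_ne_pipe cs hcs'
    simp only [good, lastOk, h1, h2, Bool.or_false]
    cases hs : (c == 's') <;> simp

lemma good_pipe_seg (seg rest : List Char) (hseg : '|' ∉ seg) :
    good '|' (seg ++ '|' :: rest) = (segInner seg && good '|' rest) := by
  cases seg with
  | nil => simp [good, segInner]
  | cons c seg =>
    have hc : c ≠ '|' := fun h => hseg (h ▸ List.mem_cons_self)
    have hseg' : '|' ∉ seg := fun h => hseg (List.mem_cons_of_mem _ h)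
    cases seg with
    | nil =>
      simp only [List.cons_append, List.nil_append, good, segInner, List.headD_cons]
      simp [good]
    | cons d seg' =>
      have hd : d ≠ '|' := fun h => hseg' (h ▸ List.mem_cons_self)
      have h1 := good_seg_pipe (d :: seg') rest c hseg' hc
      simp only [List.cons_append] at h1 ⊢
      rw [good_cons, h1]
      simp only [segInner, List.headD_cons]
      have hhd : (d == '|') = false := by simp [beq_iff_eq, hd]
      rw [hhd]
      cases hs : (c == 's') <;> cases hb : badSeg (d :: seg') <;> simp [hs, hb]
def segsOk : List (List Char) → Bool
  | [] => true
  | [t] => lastOk t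
  | seg :: more => segInner seg && segsOk more

lemma splitOn_no_pipe (cs : List Char) (h : '|' ∉ cs) : cs.splitOn '|' = [cs] := by
  simp only [List.splitOn]
  exact List.splitOnP_eq_single (p := (· == '|')) (xs := cs) (by intro x hx; simp [beq_iff_eq]; exact fun he => h (he ▸ hx))

lemma splitOn_seg (seg rest : List Char) (h : '|' ∉ seg) :
    (seg ++ '|' :: rest).splitOn '|' = seg :: rest.splitOn '|' := by
  simp only [List.splitOn]
  exact List.splitOnP_first (p := (· == '|')) (xs := seg) (by intro x hx; simp [beq_iff_eq]; exact fun he => h (he ▸ hx)) '|' (by simp) rest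

lemma first_pipe_decomp (cs : List Char) (hmem : '|' ∈ cs) :
    ∃ seg rest, cs = seg ++ '|' :: rest ∧ '|' ∉ seg := by
  refine ⟨cs.takeWhile (· ≠ '|'), (cs.dropWhile (· ≠ '|')).tail, ?_, ?_⟩
  · have hne : cs.dropWhile (· ≠ '|') ≠ [] := by
      intro hnil
      have h0 := List.takeWhile_append_dropWhile (p := (· ≠ '|')) (l := cs)
      rw [hnil, List.append_nil] at h0
      have h0' : '|' ∈ cs.takeWhile (· ≠ '|') := by rw [h0]; exact hmem
      have := List.mem_takeWhile_imp h0'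
      simp at this
    have hhead : (cs.dropWhile (· ≠ '|')).head hne = '|' := by
      have := List.head_dropWhile_not (p := (· ≠ '|')) (l := cs) hne
      simpa using this
    conv_lhs => rw [← List.takeWhile_append_dropWhile (p := (· ≠ '|')) (l := cs)]
    congr 1
    have h2 := (List.cons_head_tail hne).symm
    rw [hhead] at h2
    exact h2
  · intro hmem'
    have := List.mem_takeWhile_imp hmem'
    simp at this
lemma good_pipe_eq_segsOk (cs : List Char) : good '|' cs = segsOk (cs.splitOn '|') := by
  by_cases hmem : '|' ∈ cs
  · obtain ⟨seg, rest, hsplit, hseg⟩ := first_pipe_decomp cs hmem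
    have hlen : rest.length < cs.length := by
      rw [hsplit]; simp; omega
    rw [hsplit, good_pipe_seg seg rest hseg, splitOn_seg seg rest hseg]
    have ih := good_pipe_eq_segsOk rest
    cases hres : rest.splitOn '|' with
    | nil => exact absurd hres (List.splitOnP_ne_nil _ _)
    | cons a as =>
      rw [hres] at ih
      rw [ih]
      cases as <;> rfl
  · rw [splitOn_no_pipe cs hmem]
    simpa [segsOk] using good_pipe_no_pipe cs hmem
termination_by cs.length
decreasing_by exact hlen

lemma segsOk_eq_last_inner (segs : List (List Char)) (h : segs ≠ []) :
    segsOk segs = (if badSeg ((segs.getLastD []).drop 1) || (segs.getLastD []).take 1 == ['s']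
      then false else innerOk segs.dropLast) := by
  induction segs with
  | nil => exact absurd rfl h
  | cons seg more ih =>
    cases more with
    | nil =>
      show lastOk seg = _
      have hg : ([seg] : List (List Char)).getLastD [] = seg := rfl
      have hd : ([seg] : List (List Char)).dropLast = [] := rfl
      rw [lastOk_eq, hg, hd]
      cases hb : (badSeg (seg.drop 1) || seg.take 1 == ['s']) <;> simp [innerOk]
    | cons b bs =>
      have hmore : (b :: bs) ≠ [] := by simp
      have hL : (seg :: b :: bs).getLastD ([] : List Char) = (b :: bs).getLastD [] := by
        rfl
      rw [show segsOk (seg :: b :: bs) = (segInner seg && segsOk (b :: bs)) from rfl,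
        ih hmore, hL]
      have hDL : (seg :: b :: bs).dropLast = seg :: (b :: bs).dropLast := by
        rfl
      rw [hDL]
      cases hlast : (badSeg (((b :: bs).getLastD []).drop 1) ||
          ((b :: bs).getLastD []).take 1 == ['s'])
      · rw [if_neg (by simp)]
        show (segInner seg && innerOk ((b::bs).dropLast)) = innerOk (seg :: (b::bs).dropLast)
        rw [segInner_eq]
        show _ = (if badSeg (seg.drop 1) || (seg.take 1 == ['s'] && !(seg == ['s'])) then false
          else innerOk ((b::bs).dropLast))
        cases hb : (badSeg (seg.drop 1) || (seg.take 1 == ['s'] && !(seg == ['s']))) <;> rfl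
      · simp
lemma checkGo_eq_good (cs : List Char) :
    ∀ (suf : List Char) (k : Nat), suf = cs.drop k →
      checkGo cs (PySem.List.enumerate suf (k : Int)) =
        good (if k = 0 then ' ' else cs.getD (k - 1) ' ') suf := by
  intro suf
  induction suf with
  | nil => intro k h; simp [PySem.List.enumerate_nil, checkGo, good]
  | cons c rest ih =>
    intro k h
    have hk : k < cs.length := by
      by_contra hge
      rw [List.drop_eq_nil_of_le (Nat.le_of_not_lt hge)] at h
      exact List.cons_ne_nil _ _ h
    rw [List.drop_eq_getElem_cons hk] at h
    injection h with hc hrest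
    have ih' := ih (k + 1) hrest
    have hcast : (k : Int) + 1 = ((k + 1 : Nat) : Int) := by omega
    have hprev : ((k : Int) == 0 || !(PySem.List.pyGet? cs ((k : Int) - 1) == some '|')) =
        !((if k = 0 then ' ' else cs.getD (k - 1) ' ') == '|') := by
      by_cases h0 : k = 0
      · subst h0; simp [PySem.List.pyGet?]
      · have hm : PySem.List.pyGet? cs ((k : Int) - 1) = some cs[k-1] := by
          rw [show (k : Int) - 1 = ((k - 1 : Nat) : Int) by omega, PySem.List.pyGet?_natCast]
          simp [List.getElem?_eq_getElem (by omega : k - 1 < cs.length)]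
        have hgm : cs.getD (k - 1) ' ' = cs[k-1] := List.getD_eq_getElem cs ' ' (by omega)
        have hk0 : ((k:Nat):Int) ≠ 0 := by omega
        simp [hm, hgm, h0, hk0, List.getElem?_eq_getElem (show k - 1 < cs.length by omega)]
    have hnext : ((k : Int) == (cs.length : Int) - 1 ||
          !(PySem.List.pyGet? cs ((k : Int) + 1) == some '|')) =
        !(rest.headD ' ' == '|') := by
      by_cases hlast : k = cs.length - 1
      · have h1 : PySem.List.pyGet? cs ((k : Int) + 1) = none := by
          rw [hcast, PySem.List.pyGet?_natCast]
          simp [List.getElem?_eq_none_iff]; omega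
        have hrest0 : rest = [] := by
          rw [hrest, List.drop_eq_nil_of_le (by omega)]
        have heq : ((k:Nat):Int) = (cs.length : Int) - 1 := by omega
        simp [h1, hrest0, heq]
      · have hk1 : k + 1 < cs.length := by omega
        have h1 : PySem.List.pyGet? cs ((k : Int) + 1) = some cs[k+1] := by
          rw [hcast, PySem.List.pyGet?_natCast, List.getElem?_eq_getElem hk1]
        have hhd : rest.head?.getD ' ' = cs[k+1] := by
          rw [hrest, List.drop_eq_getElem_cons hk1]
          simp [List.getElem?_eq_getElem hk1]
        have hne : ((k:Nat):Int) ≠ (cs.length : Int) - 1 := by omega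
        simp [h1, hhd, hne, List.getElem?_eq_getElem hk1]
    have hstep : good (if (k+1) = 0 then ' ' else cs.getD (k+1-1) ' ') rest = good c rest := by
      have h2 : (if (k+1) = 0 then ' ' else cs.getD (k+1-1) ' ') = c := by
        rw [if_neg (by omega), Nat.add_sub_cancel, hc]
        exact List.getD_eq_getElem cs ' ' hk
      rw [h2]
    rw [PySem.List.enumerate_cons, checkGo, hcast, ih', hstep]
    subst hc
    rw [good_cons]
    by_cases hlr : (cs[k] == 'l' || cs[k] == 'r') = true
    · have hlrs : (cs[k] == 'l' || cs[k] == 'r' || cs[k] == 's') = true := by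
        simp only [Bool.or_eq_true] at *; tauto
      have hs : (cs[k] == 's') = false := by
        simp only [Bool.or_eq_true, beq_iff_eq] at hlr ⊢
        rcases hlr with h | h <;> simp [h]
      rw [hlr]
      simp only [Bool.true_and, hprev, hlrs, hs]
      cases hp : ((if k = 0 then ' ' else cs.getD (k - 1) ' ') == '|') <;> simp [hp]
    · have hlr' : (cs[k] == 'l' || cs[k] == 'r') = false := Bool.of_not_eq_true hlr
      rw [hlr']
      simp only [Bool.false_and, if_false]
      by_cases hs : (cs[k] == 's') = true
      · have hlrs : (cs[k] == 'l' || cs[k] == 'r' || cs[k] == 's') = true := by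
          simp only [Bool.or_eq_true] at *; tauto
        have hprev' : ((if k = 0 then ' ' else cs.getD (k - 1) ' ') == '|') =
            !((k : Int) == 0 || !(PySem.List.pyGet? cs ((k : Int) - 1) == some '|')) := by
          rw [hprev]; simp
        have hnext' : (rest.headD ' ' == '|') =
            !((k : Int) == (cs.length : Int) - 1 ||
              !(PySem.List.pyGet? cs ((k : Int) + 1) == some '|')) := by
          rw [hnext]; simp
        rw [hs, hprev', hnext']
        simp only [hlrs, Bool.not_true, Bool.false_or, Bool.true_and]
        cases hP : ((k : Int) == (cs.length : Int) - 1) <;> cases hQ : ((k : Int) == 0) <;>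
          cases hR : (PySem.List.pyGet? cs ((k : Int) - 1) == some '|') <;>
          cases hS : (PySem.List.pyGet? cs ((k : Int) + 1) == some '|') <;>
          simp [hP, hQ, hR, hS]
      · have hs' : (cs[k] == 's') = false := Bool.of_not_eq_true hs
        have hlrs : (cs[k] == 'l' || cs[k] == 'r' || cs[k] == 's') = false := by
          simp only [Bool.or_eq_true, Bool.or_eq_false_iff] at *; tauto
        simp [hs', hlrs]

-- ===== VERDICT (by name: the statement is the Claim_ definition above) =====
theorem check_spec : Claim_equal_check := by
  intro line _
  show check line = check_alt line
  unfold check check_alt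
  set cs := line.toList with hcs
  have hA : checkGo cs (PySem.List.enumerate cs ((0 : Nat) : Int)) = good ' ' cs := by
    simpa using checkGo_eq_good cs cs 0 rfl
  rw [show ((0:Nat):Int) = 0 from rfl] at hA
  rw [hA]
  by_cases hmem : '|' ∈ cs
  · obtain ⟨seg, rest, hsplit, hseg⟩ := first_pipe_decomp cs hmem
    rw [hsplit, good_seg_pipe seg rest ' ' hseg (by decide), splitOn_seg seg rest hseg]
    have hres : rest.splitOn '|' ≠ [] := List.splitOnP_ne_nil _ _
    have h2 : good '|' rest = segsOk (rest.splitOn '|') := good_pipe_eq_segsOk rest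
    rw [h2, segsOk_eq_last_inner _ hres]
    cases hb : badSeg seg
    · simp only [hb, Bool.not_false, Bool.true_and, Bool.false_eq_true, if_false]
      have hie : (rest.splitOn '|').isEmpty = false := by
        cases hx : rest.splitOn '|' with
        | nil => exact absurd hx hres
        | cons a as => simp
      rw [hie]
      simp only [Bool.false_eq_true, if_false]
    · simp [hb]
  · rw [splitOn_no_pipe cs hmem]
    rw [good_no_pipe cs ' ' hmem (by decide)]
    cases hb : badSeg cs <;> simp [hb]
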